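-- pv_equiv track=rewrite | github.com/fmwalle/Data_Stracture_excersise | week1/week2/erliestReviwed.py | earliestFellows
-- ===== SOURCE A (Python) =====
-- def earliestFellows(fellowTimes: dict):
--     smallest=float('inf')
--     listofName=[]
--     for name,days in fellowTimes.items():
--        if days< smallest:
--            listofName=[name]
--            smallest=days
--        elif smallest==days:
--            listofName.append(name)
--
--
--
--     return listofName
-- ===== SOURCE B (Python) =====
-- def earliestFellows(fellowTimes: dict):
--     if not fellowTimes:
--         return []
--     m = min(fellowTimes.values())
--     return [name for name, days in fellowTimes.items() if days == m]
-- ===== Notes on version B (the rewrite author's own statement) =====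
-- stated objective: simpler
-- what changed: Replaces A's fused running-minimum loop with tie-collection branches by two sequential passes: min() over the values, then a comprehension filtering the names equal to it.
import Mathlib
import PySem

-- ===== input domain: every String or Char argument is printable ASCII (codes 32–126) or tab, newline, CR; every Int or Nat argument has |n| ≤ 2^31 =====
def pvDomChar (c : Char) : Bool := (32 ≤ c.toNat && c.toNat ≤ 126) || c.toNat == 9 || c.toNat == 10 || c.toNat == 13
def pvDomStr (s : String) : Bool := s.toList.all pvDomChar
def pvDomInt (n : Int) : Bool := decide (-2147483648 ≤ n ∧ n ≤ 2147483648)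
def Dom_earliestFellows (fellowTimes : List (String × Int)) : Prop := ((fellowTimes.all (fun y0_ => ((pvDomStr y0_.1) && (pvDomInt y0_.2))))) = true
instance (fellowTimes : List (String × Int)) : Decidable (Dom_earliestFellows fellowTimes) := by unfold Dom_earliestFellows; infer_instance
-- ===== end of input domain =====

-- B replaces A's fused running-minimum/tie-collection loop by two sequential passes (min, then filter); objective: simpler.


-- ===== PORT A =====
-- state: (smallest, listofName); smallest = none models float('inf') (every int is below it)
def earliestFellowsStep (st : Option Int × List String) (p : String × Int) : Option Int × List String :=
  match st.1 with
  | none => (some p.2, [p.1])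
  | some s =>
    if p.2 < s then (some p.2, [p.1])
    else if s == p.2 then (st.1, st.2 ++ [p.1])
    else st

def earliestFellows (fellowTimes : List (String × Int)) : List String :=
  (fellowTimes.foldl earliestFellowsStep ((none : Option Int), ([] : List String))).2

-- ===== PORT B =====
def earliestFellows_alt (fellowTimes : List (String × Int)) : List String :=
  match fellowTimes with
  | [] => []
  | _ =>
    match PySem.List.min? (fellowTimes.map (fun p => p.2)) (fun x => x) with
    | none => []   -- unreachable: the list is nonempty
    | some m => (fellowTimes.filter (fun p => p.2 == m)).map (fun p => p.1)

-- ===== PRECONDITION & SPEC =====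
def Spec_earliestFellows (fellowTimes : List (String × Int)) (out : List String) : Prop := out = earliestFellows_alt fellowTimes
instance (fellowTimes : List (String × Int)) (out : List String) : Decidable (Spec_earliestFellows fellowTimes out) := by unfold Spec_earliestFellows; infer_instance

-- ===== CLAIM (what is proved, stated in full; the proofs are below) =====
def Claim_equal_earliestFellows : Prop := ∀ (fellowTimes : List (String × Int)), Dom_earliestFellows fellowTimes → Spec_earliestFellows fellowTimes (earliestFellows fellowTimes)

-- ===== LEMMAS AND PROOFS =====

-- invariant of A's loop from a state with current minimum m and collected names acc
theorem foldl_min_le (t : List (String × Int)) :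
    ∀ x : Int, t.foldl (fun a p => min a p.2) x ≤ x := by
  induction t with
  | nil => intro x; simp
  | cons q t' ih' =>
    intro x
    simp only [List.foldl_cons]
    exact le_trans (ih' (min x q.2)) (min_le_left x q.2)

theorem earliestFellows_loop (l : List (String × Int)) :
    ∀ (m : Int) (acc : List String),
    l.foldl earliestFellowsStep (some m, acc) =
      (some (l.foldl (fun a p => min a p.2) m),
       (if m = l.foldl (fun a p => min a p.2) m then acc else []) ++
         (l.filter (fun p => p.2 == l.foldl (fun a p => min a p.2) m)).map (fun p => p.1)) := by
  induction l with
  | nil => intro m acc; simp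
  | cons p t ih =>
    intro m acc
    have hmin := foldl_min_le t
    simp only [List.foldl_cons, earliestFellowsStep]
    by_cases h1 : p.2 < m
    · rw [if_pos h1, ih]
      have hm : min m p.2 = p.2 := by omega
      simp only [hm, List.filter_cons]
      have hne : ¬ m = t.foldl (fun a q => min a q.2) p.2 := by
        have := hmin p.2; omega
      rw [if_neg hne]
      by_cases h2 : p.2 = t.foldl (fun a q => min a q.2) p.2
      · rw [if_pos h2, if_pos (show (p.2 == t.foldl (fun a q => min a q.2) p.2) = true by
          simpa using h2)]
        simp
      · rw [if_neg h2, if_neg (show ¬ (p.2 == t.foldl (fun a q => min a q.2) p.2) = true by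
          simpa using h2)]
    · rw [if_neg h1]
      by_cases h2 : m = p.2
      · rw [if_pos (show (m == p.2) = true by simpa using h2), ih]
        have hm : min m p.2 = m := by omega
        simp only [hm, List.filter_cons]
        by_cases h3 : m = t.foldl (fun a q => min a q.2) m
        · rw [if_pos h3, if_pos h3, if_pos (show (p.2 == t.foldl (fun a q => min a q.2) m) = true by
            simp [← h2, ← h3])]
          simp
        · rw [if_neg h3, if_neg h3, if_neg (show ¬ (p.2 == t.foldl (fun a q => min a q.2) m) = true by
            simp [← h2]; omega)]
      · rw [if_neg (show ¬ (m == p.2) = true by simpa using h2), ih]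
        have hm : min m p.2 = m := by omega
        simp only [hm, List.filter_cons]
        rw [if_neg (show ¬ (p.2 == t.foldl (fun a q => min a q.2) m) = true by
          have := hmin m; simp; omega)]

theorem earliestFellows_eq (l : List (String × Int)) :
    earliestFellows l = earliestFellows_alt l := by
  cases l with
  | nil => rfl
  | cons p t =>
    unfold earliestFellows earliestFellows_alt
    simp only [List.foldl_cons, earliestFellowsStep, List.map_cons]
    rw [PySem.List.min?_id_cons]
    have hfold : (t.map (fun p => p.2)).foldl min p.2 = t.foldl (fun a q => min a q.2) p.2 := by
      simp [List.foldl_map]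
    rw [earliestFellows_loop, hfold]
    simp only [List.filter_cons]
    by_cases h : p.2 = t.foldl (fun a q => min a q.2) p.2
    · rw [if_pos h, if_pos (show (p.2 == t.foldl (fun a q => min a q.2) p.2) = true by simpa using h)]
      simp
    · rw [if_neg h, if_neg (show ¬ (p.2 == t.foldl (fun a q => min a q.2) p.2) = true by simpa using h)]
      simp

-- ===== VERDICT (by name: the statement is the Claim_ definition above) =====
theorem earliestFellows_spec : Claim_equal_earliestFellows := by
  intro l _
  exact earliestFellows_eq l
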